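-- pv_equiv track=rewrite | github.com/emmigalfo/Advent_Of_Code_23 | Day_3/solution_2.py | complete_numbers_indices
-- ===== SOURCE A (Python) =====
-- def is_number(char):
--     return char.isdigit()
--
-- def complete_numbers_indices(grid):
--     nums_dict = {}
--     rows = len(grid)
--     cols = len(grid[0])
--     # right, left
--     digits_to_skip = []
--     for x in range(cols):
--         for y in range(rows):
--             if is_number(grid[y][x]) and (x,y) not in digits_to_skip:
--                 full_number = grid[y][x]
--                 next_x = x + 1
--                 while next_x < cols and is_number(grid[y][next_x]):
--                     full_number += grid[y][next_x]
--                     digits_to_skip.append((next_x,y))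
--                     next_x += 1
--
--                 nums_dict[(x,y)] = full_number
--
--     return nums_dict
-- ===== SOURCE B (Python) =====
-- def complete_numbers_indices(grid):
--     cols = len(grid[0])
--     # Pass 1: split each row into maximal digit runs, indexed by run start column.
--     row_runs = []
--     for row in grid:
--         runs = {}
--         x = 0
--         while x < cols:
--             if row[x].isdigit():
--                 start = x
--                 while x < cols and row[x].isdigit():
--                     x += 1
--                 runs[start] = row[start:x]
--             else:
--                 x += 1
--         row_runs.append(runs)
--     # Pass 2: assemble the dict in column-major key order by lookup.
--     return {(x, y): row_runs[y][x]
--             for x in range(cols)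
--             for y in range(len(grid))
--             if x in row_runs[y]}
-- ===== Notes on version B (the rewrite author's own statement) =====
-- stated objective: alternative
-- what changed: Two staged passes replace A's single column-major scan with a skip list: pass 1 splits each row into its maximal digit runs via a per-row dict keyed by start column (no skip list, no per-cell extension), pass 2 assembles the result by O(1) dict lookups in column-major key order.
import Mathlib
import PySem

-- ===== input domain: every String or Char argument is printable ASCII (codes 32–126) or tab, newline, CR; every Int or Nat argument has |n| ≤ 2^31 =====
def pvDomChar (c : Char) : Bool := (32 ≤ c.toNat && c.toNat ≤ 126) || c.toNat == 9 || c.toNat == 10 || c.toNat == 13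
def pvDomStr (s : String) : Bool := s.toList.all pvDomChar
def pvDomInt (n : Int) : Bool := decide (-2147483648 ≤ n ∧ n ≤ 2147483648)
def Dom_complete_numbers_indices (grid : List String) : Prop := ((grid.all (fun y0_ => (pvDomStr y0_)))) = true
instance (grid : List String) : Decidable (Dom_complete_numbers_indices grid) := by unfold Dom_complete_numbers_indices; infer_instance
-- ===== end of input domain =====

-- B replaces A's skip-list column scan by two staged passes: per-row maximal digit
-- runs indexed by start column, then column-major assembly by lookup.


-- ===== PORT A =====
-- char at grid[y][x] (in range whenever Pre_ holds; default never reached inside Pre_)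
def cniCharAt (grid : List String) (y x : Nat) : Char :=
  ((grid.getD y "").toList).getD x ' '

-- is_number(char) = char.isdigit() (exact on the ASCII domain)
def cniIsNumber (c : Char) : Bool := PySem.Chars.isdigit c

-- the 'while next_x < cols and is_number(grid[y][next_x])' loop of A:
-- extends the number string and appends each consumed cell to digits_to_skip
def cniExtendA (grid : List String) (y cols : Nat) (nx : Nat) (acc : String)
    (skip : List (Nat × Nat)) : String × List (Nat × Nat) :=
  if nx < cols ∧ cniIsNumber (cniCharAt grid y nx) then
    cniExtendA grid y cols (nx + 1) (acc.push (cniCharAt grid y nx)) (skip ++ [(nx, y)])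
  else (acc, skip)
  termination_by cols - nx
  decreasing_by omega

-- body of A's inner loop (one cell (x,y)); keys of nums_dict are fresh starts, so the
-- dict's item list is built by plain append
def cniStepA (grid : List String) (cols x : Nat)
    (st : List (Int × Int × String) × List (Nat × Nat)) (y : Nat) :
    List (Int × Int × String) × List (Nat × Nat) :=
  if cniIsNumber (cniCharAt grid y x) && !(st.2.contains (x, y)) then
    let r := cniExtendA grid y cols (x + 1) (String.singleton (cniCharAt grid y x)) st.2
    (st.1 ++ [((x : Int), (y : Int), r.1)], r.2)
  else st

def complete_numbers_indices (grid : List String) : List (Int × Int × String) :=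
  let rows := grid.length
  let cols := (grid.headI).toList.length
  ((List.range cols).foldl
    (fun st x => (List.range rows).foldl (cniStepA grid cols x) st)
    ([], [])).1

-- ===== PORT B =====
-- the inner 'while x < cols and row[x].isdigit(): x += 1' of B: the end of the digit
-- run starting at x
def cniRunEnd (r : List Char) (cols x : Nat) : Nat :=
  if x < cols ∧ PySem.Chars.isdigit (r.getD x ' ') then cniRunEnd r cols (x + 1) else x
  termination_by cols - x
  decreasing_by omega

-- needed by cniScanRuns's termination: the run end never moves left
theorem cniRunEnd_ge (r : List Char) (cols : Nat) :
    ∀ x, x ≤ cniRunEnd r cols x := by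
  intro x
  induction' h : cols - x using Nat.strong_induction_on with n ih generalizing x
  rw [cniRunEnd]
  split
  · next hc => exact le_trans (by omega) (ih (cols - (x + 1)) (by omega) (x + 1) rfl)
  · exact le_refl x

-- B's outer 'while x < cols' per-row loop: the dict of maximal digit runs of row r,
-- keyed by start column (assoc list in insertion order; row[start:x] is the slice)
def cniScanRuns (r : List Char) (cols x : Nat) : List (Nat × String) :=
  if x < cols then
    if PySem.Chars.isdigit (r.getD x ' ') then
      (x, String.ofList (PySem.List.slice r (some (x : Int))
            (some ((cniRunEnd r cols (x + 1) : Nat) : Int)))) ::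
        cniScanRuns r cols (cniRunEnd r cols (x + 1))
    else cniScanRuns r cols (x + 1)
  else []
  termination_by cols - x
  decreasing_by
  · have := cniRunEnd_ge r cols (x + 1); omega
  · omega

-- the dict comprehension: x outer, y inner, 'if x in row_runs[y]' = lookup
def complete_numbers_indices_alt (grid : List String) : List (Int × Int × String) :=
  let cols := (grid.headI).toList.length
  let rowRuns := grid.map (fun row => cniScanRuns row.toList cols 0)
  (List.range cols).foldl
    (fun nums x =>
      (List.range grid.length).foldl
        (fun nums y =>
          match (rowRuns.getD y []).lookup x with
          | some s => nums ++ [((x : Int), (y : Int), s)]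
          | none => nums)
        nums)
    []

-- ===== PRECONDITION & SPEC =====
-- Pre_ excludes exactly the inputs where Python A raises IndexError: the empty grid
-- (grid[0]) and ragged grids with a row shorter than row 0 (grid[y][x], x < cols).
def Pre_complete_numbers_indices (grid : List String) : Prop :=
  grid ≠ [] ∧ ∀ s ∈ grid, (grid.headI).toList.length ≤ s.toList.length

instance (grid : List String) : Decidable (Pre_complete_numbers_indices grid) := by
  unfold Pre_complete_numbers_indices; infer_instance

def pvWitness_complete_numbers_indices : List String := ["12.4", ".5.6", "78.."]

def Spec_complete_numbers_indices (grid : List String) (out : List (Int × Int × String)) : Prop := out = complete_numbers_indices_alt grid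
instance (grid : List String) (out : List (Int × Int × String)) : Decidable (Spec_complete_numbers_indices grid out) := by unfold Spec_complete_numbers_indices; infer_instance

-- ===== CLAIM (what is proved, stated in full; the proofs are below) =====
def Claim_equal_complete_numbers_indices : Prop := ∀ (grid : List String), Dom_complete_numbers_indices grid → Pre_complete_numbers_indices grid → Spec_complete_numbers_indices grid (complete_numbers_indices grid)

-- ===== LEMMAS AND PROOFS =====

-- PART 1: A equals a canonical column-major scan cniCanon in which a cell starts a
-- number iff it is a digit with no digit to its left (no skip list needed).

-- the extension loop without the skip list
def cniExtendB (grid : List String) (y cols : Nat) (nx : Nat) (acc : String) : String :=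
  if nx < cols ∧ cniIsNumber (cniCharAt grid y nx) then
    cniExtendB grid y cols (nx + 1) (acc.push (cniCharAt grid y nx))
  else acc
  termination_by cols - nx
  decreasing_by omega

-- canonical inner-loop body: start test = digit with no digit to the left
def cniStepC (grid : List String) (cols x : Nat)
    (nums : List (Int × Int × String)) (y : Nat) : List (Int × Int × String) :=
  if cniIsNumber (cniCharAt grid y x) &&
      (decide (x = 0) || !cniIsNumber (cniCharAt grid y (x - 1))) then
    nums ++ [((x : Int), (y : Int),
      cniExtendB grid y cols (x + 1) (String.singleton (cniCharAt grid y x)))]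
  else nums

def cniCanon (grid : List String) : List (Int × Int × String) :=
  (List.range (grid.headI).toList.length).foldl
    (fun nums x => (List.range grid.length).foldl (cniStepC grid (grid.headI).toList.length x) nums)
    []

-- all cells from s to i in row y are digits
def cniAllDig (grid : List String) (y s i : Nat) : Prop :=
  ∀ j, s ≤ j → j ≤ i → cniIsNumber (cniCharAt grid y j) = true

-- membership invariant of digits_to_skip after processing columns < x fully and,
-- within column x, rows < b
def cniInv (grid : List String) (rows cols x b : Nat) (skip : List (Nat × Nat)) : Prop :=
  ∀ i y, (i, y) ∈ skip ↔
    (y < rows ∧ i < cols ∧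
      ((∃ s, s < x ∧ s < i ∧ cniAllDig grid y s i) ∨
       (y < b ∧ x < i ∧ cniAllDig grid y x i)))

theorem cniExtendA_fst (grid : List String) (y cols : Nat) :
    ∀ nx acc skip, (cniExtendA grid y cols nx acc skip).1 = cniExtendB grid y cols nx acc := by
  intro nx
  induction' h : cols - nx using Nat.strong_induction_on with n ih generalizing nx
  intro acc skip
  rw [cniExtendA, cniExtendB]
  split
  · next hc =>
    subst h
    exact ih (cols - (nx + 1)) (by omega) (nx + 1) rfl _ _
  · rfl

theorem cniExtendA_snd_mem (grid : List String) (y cols : Nat) :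
    ∀ nx acc skip p, p ∈ (cniExtendA grid y cols nx acc skip).2 ↔
      (p ∈ skip ∨ ∃ i, nx ≤ i ∧ i < cols ∧ cniAllDig grid y nx i ∧ p = (i, y)) := by
  intro nx
  induction' h : cols - nx using Nat.strong_induction_on with n ih generalizing nx
  intro acc skip p
  rw [cniExtendA]
  split
  · next hc =>
    subst h
    rw [ih (cols - (nx + 1)) (by omega) (nx + 1) rfl]
    simp only [List.mem_append, List.mem_singleton]
    constructor
    · rintro ((hp | hp) | ⟨i, h1, h2, h3, h4⟩)
      · exact Or.inl hp
      · exact Or.inr ⟨nx, le_refl _, hc.1, by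
          intro j hj1 hj2
          have : j = nx := by omega
          subst this; exact hc.2, hp⟩
      · exact Or.inr ⟨i, by omega, h2, by
          intro j hj1 hj2
          rcases Nat.eq_or_lt_of_le hj1 with he | hl
          · subst he; exact hc.2
          · exact h3 j (by omega) hj2, h4⟩
    · rintro (hp | ⟨i, h1, h2, h3, h4⟩)
      · exact Or.inl (Or.inl hp)
      · rcases Nat.eq_or_lt_of_le h1 with he | hl
        · subst he; exact Or.inl (Or.inr h4)
        · exact Or.inr ⟨i, by omega, h2, fun j hj1 hj2 => h3 j (by omega) hj2, h4⟩
  · next hc =>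
    constructor
    · exact Or.inl
    · rintro (hp | ⟨i, h1, h2, h3, h4⟩)
      · exact hp
      · exact absurd ⟨by omega, h3 nx (le_refl _) h1⟩ hc

-- one inner step preserves equality of the nums lists and the invariant
theorem cniStep_eq (grid : List String) (rows cols x y : Nat) (hx : x < cols) (hy : y < rows)
    (numsA : List (Int × Int × String)) (skip : List (Nat × Nat))
    (hinv : cniInv grid rows cols x y skip) :
    (cniStepA grid cols x (numsA, skip) y).1 = cniStepC grid cols x numsA y ∧
    cniInv grid rows cols x (y + 1) (cniStepA grid cols x (numsA, skip) y).2 := by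
  have hmem : skip.contains (x, y) = true ↔
      (0 < x ∧ cniIsNumber (cniCharAt grid y (x - 1)) = true ∧
        cniIsNumber (cniCharAt grid y x) = true) := by
    rw [List.contains_iff_mem, hinv]
    constructor
    · rintro ⟨-, -, (⟨s, hs1, hs2, hs3⟩ | ⟨-, hlt, -⟩)⟩
      · exact ⟨by omega, hs3 (x - 1) (by omega) (by omega), hs3 x (by omega) (le_refl _)⟩
      · omega
    · rintro ⟨h0, h1, h2⟩
      refine ⟨hy, hx, Or.inl ⟨x - 1, by omega, by omega, ?_⟩⟩
      intro j hj1 hj2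
      rcases Nat.lt_or_ge j x with hl | hg
      · have : j = x - 1 := by omega
        subst this; exact h1
      · have : j = x := by omega
        subst this; exact h2
  by_cases hd : cniIsNumber (cniCharAt grid y x) = true
  · by_cases hs : skip.contains (x, y) = true
    · -- digit but skipped in A; the left-neighbour test also rejects it
      have hL := hmem.mp hs
      have hstepA : cniStepA grid cols x (numsA, skip) y = (numsA, skip) := by
        unfold cniStepA; simp [hd, List.contains_iff_mem.mp hs]
      have hstepC : cniStepC grid cols x numsA y = numsA := by
        unfold cniStepC
        simp [hd, hL.2.1, Nat.pos_iff_ne_zero.mp hL.1]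
      refine ⟨by rw [hstepA, hstepC], ?_⟩
      rw [hstepA]
      -- row y's tail cells are already in skip via the old run start
      intro i y'
      rw [hinv]
      constructor
      · rintro ⟨h1, h2, h3 | h3⟩
        · exact ⟨h1, h2, Or.inl h3⟩
        · exact ⟨h1, h2, Or.inr ⟨by omega, h3.2.1, h3.2.2⟩⟩
      · rintro ⟨h1, h2, h3 | ⟨hb, hlt, hall⟩⟩
        · exact ⟨h1, h2, Or.inl h3⟩
        · by_cases hyy : y' = y
          · subst hyy
            refine ⟨h1, h2, Or.inl ⟨x - 1, by omega, by omega, ?_⟩⟩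
            intro j hj1 hj2
            rcases Nat.lt_or_ge j x with hl | hg
            · have : j = x - 1 := by omega
              subst this; exact hL.2.1
            · exact hall j hg hj2
          · exact ⟨h1, h2, Or.inr ⟨by omega, hlt, hall⟩⟩
    · -- start cell: both append the same entry; extension adds row y's tail cells
        have hs' : skip.contains (x, y) = false := by
          rw [Bool.eq_false_iff]; exact hs
        have hL : ¬ (0 < x ∧ cniIsNumber (cniCharAt grid y (x - 1)) = true ∧
            cniIsNumber (cniCharAt grid y x) = true) := fun h => hs (hmem.mpr h)
        have hBtest : (decide (x = 0) || !cniIsNumber (cniCharAt grid y (x - 1))) = true := by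
          by_cases h0 : x = 0
          · simp [h0]
          · simp only [h0, decide_false, Bool.false_or, Bool.not_eq_true']
            rw [Bool.eq_false_iff]
            intro hL1
            exact hL ⟨by omega, hL1, hd⟩
        constructor
        · unfold cniStepA cniStepC
          simp only [hd, hs', hBtest, Bool.not_false, if_pos,
            Bool.and_self]
          rw [cniExtendA_fst]
        · unfold cniStepA
          simp only [hd, hs', Bool.not_false, Bool.and_true, if_pos]
          intro i y'
          rw [cniExtendA_snd_mem]
          simp only [Prod.mk.injEq]
          rw [hinv]
          constructor
          · rintro (⟨h1, h2, h3 | h3⟩ | ⟨i', hi1, hi2, hi3, hi4, hi5⟩)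
            · exact ⟨h1, h2, Or.inl h3⟩
            · exact ⟨h1, h2, Or.inr ⟨by omega, h3.2.1, h3.2.2⟩⟩
            · subst hi4; subst hi5
              refine ⟨hy, hi2, Or.inr ⟨by omega, by omega, ?_⟩⟩
              intro j hj1 hj2
              rcases Nat.eq_or_lt_of_le hj1 with he | hl
              · subst he; exact hd
              · exact hi3 j (by omega) hj2
          · rintro ⟨h1, h2, h3 | ⟨hb, hlt, hall⟩⟩
            · exact Or.inl ⟨h1, h2, Or.inl h3⟩
            · by_cases hyy : y' = y
              · subst hyy
                exact Or.inr ⟨i, by omega, h2, fun j hj1 hj2 => hall j (by omega) hj2,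
                  rfl, rfl⟩
              · exact Or.inl ⟨h1, h2, Or.inr ⟨by omega, hlt, hall⟩⟩
  · -- not a digit: both skip, no cells added
    have hstepA : cniStepA grid cols x (numsA, skip) y = (numsA, skip) := by
      unfold cniStepA; simp [hd]
    have hstepC : cniStepC grid cols x numsA y = numsA := by
      unfold cniStepC; simp [hd]
    refine ⟨by rw [hstepA, hstepC], ?_⟩
    rw [hstepA]
    intro i y'
    rw [hinv]
    constructor
    · rintro ⟨h1, h2, h3 | h3⟩
      · exact ⟨h1, h2, Or.inl h3⟩
      · exact ⟨h1, h2, Or.inr ⟨by omega, h3.2.1, h3.2.2⟩⟩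
    · rintro ⟨h1, h2, h3 | ⟨hb, hlt, hall⟩⟩
      · exact ⟨h1, h2, Or.inl h3⟩
      · by_cases hyy : y' = y
        · subst hyy
          exact absurd (hall x (le_refl _) (by omega)) hd
        · exact ⟨h1, h2, Or.inr ⟨by omega, hlt, hall⟩⟩

-- the inner loop over a block of rows
theorem cniInner (grid : List String) (rows cols x : Nat) (hx : x < cols) :
    ∀ n a numsA skip, a + n ≤ rows → cniInv grid rows cols x a skip →
      ((List.range' a n).foldl (cniStepA grid cols x) (numsA, skip)).1 =
        (List.range' a n).foldl (cniStepC grid cols x) numsA ∧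
      cniInv grid rows cols x (a + n)
        ((List.range' a n).foldl (cniStepA grid cols x) (numsA, skip)).2 := by
  intro n
  induction n with
  | zero =>
    intro a numsA skip _ hinv
    simp only [List.range'_zero, List.foldl_nil, Nat.add_zero]
    exact ⟨trivial, hinv⟩
  | succ m ih =>
    intro a numsA skip hle hinv
    rw [List.range'_succ]
    simp only [List.foldl_cons]
    have hstep := cniStep_eq grid rows cols x a hx (by omega) numsA skip hinv
    have : cniStepA grid cols x (numsA, skip) a =
        ((cniStepA grid cols x (numsA, skip) a).1, (cniStepA grid cols x (numsA, skip) a).2) := rfl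
    rw [this, hstep.1]
    have := ih (a + 1) (cniStepC grid cols x numsA a)
      (cniStepA grid cols x (numsA, skip) a).2 (by omega) hstep.2
    constructor
    · exact this.1
    · have he : a + 1 + m = a + (m + 1) := by omega
      rw [← he]
      exact this.2

-- the outer loop over a block of columns
theorem cniOuter (grid : List String) (rows cols : Nat) :
    ∀ m x numsA skip, x + m ≤ cols → cniInv grid rows cols x 0 skip →
      ((List.range' x m).foldl
        (fun st x' => (List.range' 0 rows).foldl (cniStepA grid cols x') st) (numsA, skip)).1 =
      (List.range' x m).foldl
        (fun nums x' => (List.range' 0 rows).foldl (cniStepC grid cols x') nums) numsA := by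
  intro m
  induction m with
  | zero => intro x numsA skip _ _; rfl
  | succ k ih =>
    intro x numsA skip hle hinv
    rw [List.range'_succ]
    simp only [List.foldl_cons]
    have hcol := cniInner grid rows cols x (by omega) rows 0 numsA skip (by omega) hinv
    simp only [Nat.zero_add] at hcol
    have hst : (List.range' 0 rows).foldl (cniStepA grid cols x) (numsA, skip) =
        (((List.range' 0 rows).foldl (cniStepA grid cols x) (numsA, skip)).1,
         ((List.range' 0 rows).foldl (cniStepA grid cols x) (numsA, skip)).2) := rfl
    rw [hst, hcol.1]
    apply ih (x + 1) _ _ (by omega)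
    -- cniInv x rows skip' = cniInv (x+1) 0 skip'
    intro i y
    rw [hcol.2 i y]
    constructor
    · rintro ⟨h1, h2, ⟨s, hs1, hs2, hs3⟩ | ⟨hb, hlt, hall⟩⟩
      · exact ⟨h1, h2, Or.inl ⟨s, by omega, hs2, hs3⟩⟩
      · exact ⟨h1, h2, Or.inl ⟨x, by omega, hlt, hall⟩⟩
    · rintro ⟨h1, h2, ⟨s, hs1, hs2, hs3⟩ | h3⟩
      · rcases Nat.lt_or_ge s x with hl | hg
        · exact ⟨h1, h2, Or.inl ⟨s, hl, hs2, hs3⟩⟩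
        · have : s = x := by omega
          subst this
          exact ⟨h1, h2, Or.inr ⟨h1, hs2, hs3⟩⟩
      · omega

theorem cniA_eq_canon (grid : List String) :
    complete_numbers_indices grid = cniCanon grid := by
  unfold complete_numbers_indices cniCanon
  simp only [List.range_eq_range']
  apply cniOuter grid grid.length (grid.headI).toList.length (grid.headI).toList.length 0 [] []
    (by omega)
  intro i y
  simp only [List.not_mem_nil, false_iff]
  rintro ⟨-, -, ⟨s, hs, -⟩ | ⟨hb, -, -⟩⟩
  · omega
  · omega

-- PART 2: the canonical scan equals B.

-- run-end facts
theorem cniRunEnd_le (r : List Char) (cols : Nat) :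
    ∀ x, x ≤ cols → cniRunEnd r cols x ≤ cols := by
  intro x
  induction' h : cols - x using Nat.strong_induction_on with n ih generalizing x
  intro hx
  rw [cniRunEnd]
  split
  · next hc => exact ih (cols - (x + 1)) (by omega) (x + 1) rfl (by omega)
  · exact hx

theorem cniRunEnd_digits (r : List Char) (cols : Nat) :
    ∀ x j, x ≤ j → j < cniRunEnd r cols x →
      PySem.Chars.isdigit (r.getD j ' ') = true := by
  intro x
  induction' h : cols - x using Nat.strong_induction_on with n ih generalizing x
  intro j hj1 hj2
  rw [cniRunEnd] at hj2
  split at hj2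
  · next hc =>
    rcases Nat.eq_or_lt_of_le hj1 with he | hl
    · subst he; exact hc.2
    · exact ih (cols - (x + 1)) (by omega) (x + 1) rfl j hl hj2
  · omega

theorem cniRunEnd_stop (r : List Char) (cols : Nat) :
    ∀ x, ¬ (cniRunEnd r cols x < cols ∧
      PySem.Chars.isdigit (r.getD (cniRunEnd r cols x) ' ') = true) := by
  intro x
  induction' h : cols - x using Nat.strong_induction_on with n ih generalizing x
  rw [cniRunEnd]
  split
  · next hc => exact ih (cols - (x + 1)) (by omega) (x + 1) rfl
  · next hc => exact hc

-- the canonical extension loop produces exactly the slice of the digit run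
theorem cniExtendB_eq (grid : List String) (y cols : Nat)
    (hlen : cols ≤ ((grid.getD y "").toList).length) :
    ∀ nx acc, cniExtendB grid y cols nx acc =
      String.ofList (acc.toList ++
        (((grid.getD y "").toList).drop nx).take
          (cniRunEnd ((grid.getD y "").toList) cols nx - nx)) := by
  intro nx
  induction' h : cols - nx using Nat.strong_induction_on with n ih generalizing nx
  intro acc
  rw [cniExtendB]
  split
  · next hc =>
    have hc' : nx < cols ∧ PySem.Chars.isdigit (((grid.getD y "").toList).getD nx ' ') = true := hc
    rw [ih (cols - (nx + 1)) (by omega) (nx + 1) rfl]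
    have hre : cniRunEnd ((grid.getD y "").toList) cols nx =
        cniRunEnd ((grid.getD y "").toList) cols (nx + 1) := by
      rw [cniRunEnd, if_pos hc']
    have hge := cniRunEnd_ge ((grid.getD y "").toList) cols (nx + 1)
    have hnx : nx < ((grid.getD y "").toList).length := by omega
    congr 1
    rw [String.toList_push, hre]
    rw [List.drop_eq_getElem_cons hnx]
    have hk : cniRunEnd ((grid.getD y "").toList) cols (nx + 1) - nx =
        (cniRunEnd ((grid.getD y "").toList) cols (nx + 1) - (nx + 1)) + 1 := by omega
    rw [hk, List.take_succ_cons, ← List.getD_eq_getElem _ ' ' hnx]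
    simp [cniCharAt]
  · next hc =>
    have : cniRunEnd ((grid.getD y "").toList) cols nx = nx := by
      rw [cniRunEnd, if_neg (by exact hc)]
    rw [this]
    simp

theorem cniLookup_cons (x k : Nat) (v : String) (l : List (Nat × String)) :
    List.lookup x ((k, v) :: l) = if x = k then some v else List.lookup x l := by
  simp only [List.lookup]
  split <;> rename_i h <;> simp_all

-- lookup in the run dict of a row: x is a key iff x starts a maximal digit run
-- reachable from scan position x0, and the value is that run's slice
theorem cniScan_lookup (r : List Char) (cols : Nat) :
    ∀ x0, (x0 = 0 ∨ cols ≤ x0 ∨ PySem.Chars.isdigit (r.getD (x0 - 1) ' ') = false ∨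
            PySem.Chars.isdigit (r.getD x0 ' ') = false) →
    ∀ x, (cniScanRuns r cols x0).lookup x =
      if x0 ≤ x ∧ x < cols ∧ PySem.Chars.isdigit (r.getD x ' ') = true ∧
          (x = 0 ∨ PySem.Chars.isdigit (r.getD (x - 1) ' ') = false)
      then some (String.ofList ((r.drop x).take (cniRunEnd r cols (x + 1) - x)))
      else none := by
  intro x0
  induction' h : cols - x0 using Nat.strong_induction_on with n ih generalizing x0
  intro hx0 x
  rw [cniScanRuns]
  by_cases hlt : x0 < cols
  · rw [if_pos hlt]
    by_cases hd : PySem.Chars.isdigit (r.getD x0 ' ') = true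
    · rw [if_pos hd]
      have hstart : x0 = 0 ∨ PySem.Chars.isdigit (r.getD (x0 - 1) ' ') = false := by
        rcases hx0 with h1 | h1 | h1 | h1
        · exact Or.inl h1
        · omega
        · exact Or.inr h1
        · rw [h1] at hd; exact absurd hd (by simp)
      set e := cniRunEnd r cols (x0 + 1) with he
      have hge : x0 + 1 ≤ e := cniRunEnd_ge r cols (x0 + 1)
      have hle : e ≤ cols := cniRunEnd_le r cols (x0 + 1) (by omega)
      have hdig : ∀ j, x0 + 1 ≤ j → j < e → PySem.Chars.isdigit (r.getD j ' ') = true :=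
        cniRunEnd_digits r cols (x0 + 1)
      have hstop := cniRunEnd_stop r cols (x0 + 1)
      rw [← he] at hstop
      have hx0e : e = 0 ∨ cols ≤ e ∨ PySem.Chars.isdigit (r.getD (e - 1) ' ') = false ∨
          PySem.Chars.isdigit (r.getD e ' ') = false := by
        by_cases hec : e < cols
        · refine Or.inr (Or.inr (Or.inr ?_))
          rcases Bool.eq_false_or_eq_true (PySem.Chars.isdigit (r.getD e ' ')) with ht | hf
          · exact absurd ⟨hec, ht⟩ hstop
          · exact hf
        · exact Or.inr (Or.inl (by omega))
      have hrec := ih (cols - e) (by omega) e rfl hx0e x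
      rw [cniLookup_cons]
      by_cases hxx : x = x0
      · subst hxx
        have hP : x ≤ x ∧ x < cols ∧ PySem.Chars.isdigit (r.getD x ' ') = true ∧
            (x = 0 ∨ PySem.Chars.isdigit (r.getD (x - 1) ' ') = false) :=
          ⟨le_refl _, hlt, hd, hstart⟩
        rw [if_pos rfl, if_pos hP, PySem.List.slice_natCast]
      · rw [if_neg hxx, hrec]
        by_cases htgt : x0 ≤ x ∧ x < cols ∧ PySem.Chars.isdigit (r.getD x ' ') = true ∧
            (x = 0 ∨ PySem.Chars.isdigit (r.getD (x - 1) ' ') = false)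
        · -- target start beyond x0: it must lie at or past e
          have hxe : e ≤ x := by
            by_contra hxe
            have hx1 : x0 + 1 ≤ x := by omega
            have : PySem.Chars.isdigit (r.getD (x - 1) ' ') = true := by
              rcases Nat.eq_or_lt_of_le hx1 with h1 | h1
              · have : x - 1 = x0 := by omega
                rw [this]; exact hd
              · exact hdig (x - 1) (by omega) (by omega)
            rcases htgt.2.2.2 with h0 | hnd
            · omega
            · rw [hnd] at this; exact absurd this (by simp)
          rw [if_pos ⟨hxe, htgt.2⟩, if_pos htgt]
        · rw [if_neg htgt, if_neg (by
            rintro ⟨h1, h2⟩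
            exact htgt ⟨by omega, h2⟩)]
    · rw [if_neg hd]
      have hrec := ih (cols - (x0 + 1)) (by omega) (x0 + 1) rfl
        (Or.inr (Or.inr (Or.inl (by
          have : x0 + 1 - 1 = x0 := by omega
          rw [this]
          exact Bool.eq_false_iff.mpr hd)))) x
      rw [hrec]
      by_cases hxx : x = x0
      · subst hxx
        rw [if_neg (by rintro ⟨h1, -⟩; omega),
            if_neg (by rintro ⟨-, -, h3, -⟩; exact hd h3)]
      · by_cases htgt : x0 + 1 ≤ x ∧ x < cols ∧ PySem.Chars.isdigit (r.getD x ' ') = true ∧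
            (x = 0 ∨ PySem.Chars.isdigit (r.getD (x - 1) ' ') = false)
        · rw [if_pos htgt, if_pos ⟨by omega, htgt.2⟩]
        · rw [if_neg htgt, if_neg (by
            rintro ⟨h1, h2⟩
            exact htgt ⟨by omega, h2⟩)]
  · rw [if_neg hlt]
    simp only [List.lookup_nil]
    rw [if_neg (by rintro ⟨h1, h2, -⟩; omega)]

-- the canonical step equals B's lookup step (in-range cells, rows long enough)
theorem cniStepC_eq_lookup (grid : List String) (cols x y : Nat)
    (hx : x < cols) (hy : y < grid.length)
    (hlen : cols ≤ ((grid.getD y "").toList).length)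
    (nums : List (Int × Int × String)) :
    cniStepC grid cols x nums y =
      (match ((grid.map (fun row => cniScanRuns row.toList cols 0)).getD y []).lookup x with
       | some s => nums ++ [((x : Int), (y : Int), s)]
       | none => nums) := by
  have hmap : (grid.map (fun row => cniScanRuns row.toList cols 0)).getD y [] =
      cniScanRuns ((grid.getD y "").toList) cols 0 := by
    have hy' : y < (grid.map (fun row => cniScanRuns row.toList cols 0)).length := by
      simpa using hy
    rw [List.getD_eq_getElem _ _ hy', List.getElem_map, List.getD_eq_getElem _ _ hy]
  have hlk := cniScan_lookup ((grid.getD y "").toList) cols 0 (Or.inl rfl) x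
  by_cases hd : PySem.Chars.isdigit (((grid.getD y "").toList).getD x ' ') = true
  · by_cases hs : x = 0 ∨ PySem.Chars.isdigit (((grid.getD y "").toList).getD (x - 1) ' ') = false
    · rw [if_pos ⟨Nat.zero_le _, hx, hd, hs⟩] at hlk
      rw [hmap, hlk]
      have hcond : (cniIsNumber (cniCharAt grid y x) &&
          (decide (x = 0) || !cniIsNumber (cniCharAt grid y (x - 1)))) = true := by
        simp only [cniIsNumber, cniCharAt, Bool.and_eq_true, Bool.or_eq_true,
          decide_eq_true_eq, Bool.not_eq_true']
        exact ⟨hd, hs⟩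
      unfold cniStepC
      rw [if_pos hcond]
      -- the extended string equals the run slice
      have hext : cniExtendB grid y cols (x + 1) (String.singleton (cniCharAt grid y x)) =
          String.ofList ((((grid.getD y "").toList).drop x).take
            (cniRunEnd ((grid.getD y "").toList) cols (x + 1) - x)) := by
        rw [cniExtendB_eq grid y cols hlen (x + 1) _]
        have hxl : x < ((grid.getD y "").toList).length := by omega
        have hge := cniRunEnd_ge ((grid.getD y "").toList) cols (x + 1)
        have hk : cniRunEnd ((grid.getD y "").toList) cols (x + 1) - x =
            (cniRunEnd ((grid.getD y "").toList) cols (x + 1) - (x + 1)) + 1 := by omega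
        rw [List.drop_eq_getElem_cons hxl, hk, List.take_succ_cons,
          ← List.getD_eq_getElem _ ' ' hxl]
        simp [cniCharAt]
      rw [hext]
    · rw [if_neg (by rintro ⟨-, -, -, h4⟩; exact hs h4)] at hlk
      rw [hmap, hlk]
      unfold cniStepC
      rw [if_neg (by
        simp only [cniIsNumber, cniCharAt, Bool.and_eq_true, Bool.or_eq_true,
          decide_eq_true_eq, Bool.not_eq_true']
        rintro ⟨-, h2⟩
        exact hs h2)]
  · rw [if_neg (by rintro ⟨-, -, h3, -⟩; exact hd h3)] at hlk
    rw [hmap, hlk]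
    unfold cniStepC
    rw [if_neg (by
      simp only [cniIsNumber, cniCharAt, Bool.and_eq_true]
      rintro ⟨h1, -⟩
      exact hd h1)]

theorem cniCanon_eq_alt (grid : List String)
    (hpre : Pre_complete_numbers_indices grid) :
    cniCanon grid = complete_numbers_indices_alt grid := by
  unfold cniCanon complete_numbers_indices_alt
  apply PySem.List.foldl_congr_mem
  intro acc x hx
  have hx' : x < (grid.headI).toList.length := List.mem_range.mp hx
  apply PySem.List.foldl_congr_mem
  intro nums y hy
  have hy' : y < grid.length := List.mem_range.mp hy
  have hlen : (grid.headI).toList.length ≤ ((grid.getD y "").toList).length := by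
    apply hpre.2
    rw [List.getD_eq_getElem _ _ hy']
    exact List.getElem_mem _
  exact cniStepC_eq_lookup grid (grid.headI).toList.length x y hx' hy' hlen nums

-- ===== VERDICT (by name: the statement is the Claim_ definition above) =====
theorem complete_numbers_indices_spec : Claim_equal_complete_numbers_indices := by
  intro grid _ hpre
  unfold Spec_complete_numbers_indices
  rw [cniA_eq_canon, cniCanon_eq_alt grid hpre]
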